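-- pv_equiv track=rewrite | github.com/Adilius/Bokeh_IMDb_Visualization | main.py | get_unique_genres
-- ===== SOURCE A (Python) =====
-- def get_unique_genres(dataframe_column):
--     df_list = list(dataframe_column)
--     return_list = list()
--     for element in df_list:
--         return_list.append(element.split("|"))  # Split each element
--     return_list = [values for sublist in return_list for values in sublist] # Flatten list
--     return_list = sorted(list(set(return_list)))    # Create unique sorted list
--     return_list.insert(0, "All")
--     return return_list
-- ===== SOURCE B (Python) =====
-- def get_unique_genres(dataframe_column):
--     # Sort-then-adjacent-dedup instead of set()-dedup-then-sort.
--     tokens = sorted(t for e in dataframe_column for t in e.split("|"))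
--     out = ["All"]
--     prev = None
--     for t in tokens:
--         if t != prev:
--             out.append(t)
--             prev = t
--     return out
-- ===== Notes on version B (the rewrite author's own statement) =====
-- stated objective: alternative
-- what changed: Replaces hash-set dedup followed by a sort with a single sort of all tokens (duplicates included) and one linear pass that skips consecutive duplicates while building the output.
import Mathlib
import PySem

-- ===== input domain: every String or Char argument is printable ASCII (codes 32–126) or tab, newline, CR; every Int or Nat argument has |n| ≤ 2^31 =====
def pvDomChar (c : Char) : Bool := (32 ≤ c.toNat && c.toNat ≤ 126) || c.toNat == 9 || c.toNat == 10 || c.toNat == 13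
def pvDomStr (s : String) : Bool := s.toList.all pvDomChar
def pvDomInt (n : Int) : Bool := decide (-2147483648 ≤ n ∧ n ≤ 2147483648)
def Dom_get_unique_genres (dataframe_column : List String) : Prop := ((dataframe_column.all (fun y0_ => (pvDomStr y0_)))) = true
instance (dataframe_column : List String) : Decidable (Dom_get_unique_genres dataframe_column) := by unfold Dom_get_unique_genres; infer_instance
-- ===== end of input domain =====

-- B replaces A's set-dedup-then-sort by sorting all tokens and one pass skipping consecutive duplicates (alternative decomposition, same cost).


-- shared primitive: element.split("|") — the separator is the non-empty literal "|", so split? is always some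
def pvSplitPipe (s : String) : List String := (PySem.Str.split? s "|").getD []

-- ===== PORT A =====
def get_unique_genres (dataframe_column : List String) : List String :=
  let df_list := dataframe_column
  let return_list : List (List String) :=
    df_list.foldl (fun acc element => acc ++ [pvSplitPipe element]) []
  let return_list2 : List String := return_list.flatMap (fun sublist => sublist)
  let return_list3 := PySem.List.sorted (PySem.Set.ofList return_list2) (fun x => x) false
  PySem.List.insert return_list3 0 "All"

-- ===== PORT B =====
def get_unique_genres_alt (dataframe_column : List String) : List String :=
  let tokens := PySem.List.sorted
    (dataframe_column.flatMap (fun e => pvSplitPipe e)) (fun x => x) false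
  let st := tokens.foldl
    (fun (st : List String × Option String) t =>
      if st.2 ≠ some t then (st.1 ++ [t], some t) else st)
    (["All"], none)
  st.1

-- ===== PRECONDITION & SPEC =====
def Spec_get_unique_genres (dataframe_column : List String) (out : List String) : Prop := out = get_unique_genres_alt dataframe_column
instance (dataframe_column : List String) (out : List String) : Decidable (Spec_get_unique_genres dataframe_column out) := by unfold Spec_get_unique_genres; infer_instance

-- ===== CLAIM (what is proved, stated in full; the proofs are below) =====
def Claim_equal_get_unique_genres : Prop := ∀ (dataframe_column : List String), Dom_get_unique_genres dataframe_column → Spec_get_unique_genres dataframe_column (get_unique_genres dataframe_column)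

-- ===== LEMMAS AND PROOFS =====

-- Proof-only recursive description of B's dedup pass.
def pvDedup : Option String → List String → List String
  | _, [] => []
  | prev, t :: ts => if prev = some t then pvDedup prev ts else t :: pvDedup (some t) ts

theorem pvFoldl_eq_dedup (l : List String) (acc : List String) (prev : Option String) :
    (l.foldl (fun (st : List String × Option String) t =>
      if st.2 = some t then st else (st.1 ++ [t], some t)) (acc, prev)).1
      = acc ++ pvDedup prev l := by
  induction l generalizing acc prev with
  | nil => simp [pvDedup]
  | cons t ts ih =>
    by_cases h : prev = some t
    · simp only [List.foldl_cons, if_pos h, pvDedup, ih]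
    · simp only [List.foldl_cons, if_neg h, pvDedup, ih, List.append_assoc, List.singleton_append]

theorem pvDedup_sorted (l : List String) (hl : l.Pairwise (· ≤ ·)) (prev : Option String)
    (hprev : ∀ p, prev = some p → ∀ y ∈ l, p ≤ y) :
    (pvDedup prev l).Pairwise (· < ·) ∧ (∀ x, x ∈ pvDedup prev l ↔ x ∈ l ∧ prev ≠ some x) := by
  induction l generalizing prev with
  | nil => simp [pvDedup]
  | cons t ts ih =>
    obtain ⟨hle, hts⟩ := List.pairwise_cons.mp hl
    have hih := ih hts (some t) (by rintro p hp y hy; cases hp; exact hle y hy)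
    by_cases h : prev = some t
    · subst h
      have hd : pvDedup (some t) (t :: ts) = pvDedup (some t) ts := by simp [pvDedup]
      rw [hd]
      refine ⟨hih.1, fun x => ?_⟩
      rw [hih.2 x]
      constructor
      · rintro ⟨hx, hne⟩; exact ⟨List.mem_cons_of_mem _ hx, hne⟩
      · rintro ⟨hx, hne⟩
        rcases List.mem_cons.mp hx with rfl | hx
        · exact absurd rfl hne
        · exact ⟨hx, hne⟩
    · simp only [pvDedup, if_neg h]
      constructor
      · refine List.pairwise_cons.mpr ⟨?_, hih.1⟩
        intro y hy
        rcases (hih.2 y).mp hy with ⟨hyts, hne⟩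
        have hyt : y ≠ t := fun e => hne (by rw [e])
        exact lt_of_le_of_ne (hle y hyts) (Ne.symm hyt)
      · intro x
        rw [List.mem_cons, hih.2 x]
        constructor
        · rintro (rfl | ⟨hx, hne⟩)
          · exact ⟨List.mem_cons_self, fun e => h e⟩
          · refine ⟨List.mem_cons_of_mem _ hx, ?_⟩
            intro e
            have hxt : x ≠ t := fun e' => hne (by rw [e'])
            have h1 : x ≤ t := hprev x e t List.mem_cons_self
            have h2 : t ≤ x := hle x hx
            exact hxt (le_antisymm h1 h2)
        · rintro ⟨hx, hne⟩
          rcases List.mem_cons.mp hx with rfl | hx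
          · exact Or.inl rfl
          · by_cases hxt : x = t
            · subst hxt; exact Or.inl rfl
            · exact Or.inr ⟨hx, fun e => hxt (Option.some.inj e).symm⟩

theorem pvFlat_eq (dc : List String) :
    (dc.foldl (fun acc element => acc ++ [pvSplitPipe element]) []).flatMap
        (fun sublist => sublist)
      = dc.flatMap (fun e => pvSplitPipe e) := by
  rw [PySem.List.foldl_append_singleton_eq_map]
  simp only [List.flatMap_def, List.nil_append, List.map_id']

theorem get_unique_genres_eq_alt (dc : List String) :
    get_unique_genres dc = get_unique_genres_alt dc := by
  unfold get_unique_genres get_unique_genres_alt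
  simp only [ne_eq, ite_not]
  rw [pvFlat_eq, PySem.List.insert_zero, pvFoldl_eq_dedup]
  set L := dc.flatMap (fun e => pvSplitPipe e) with hL
  have hpair : (PySem.List.sorted L (fun x => x) false).Pairwise (· ≤ ·) :=
    PySem.List.sorted_pairwise L (fun x => x)
  have hded := pvDedup_sorted (PySem.List.sorted L (fun x => x) false) hpair none
    (by rintro p hp; cases hp)
  have hperm : (pvDedup none (PySem.List.sorted L (fun x => x) false)).Perm (PySem.Set.ofList L) := by
    rw [List.perm_ext_iff_of_nodup (List.Pairwise.imp ne_of_lt hded.1 : (pvDedup none (PySem.List.sorted L (fun x => x) false)).Nodup) (PySem.Set.nodup_ofList L)]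
    intro x
    rw [hded.2 x, PySem.Set.mem_ofList, PySem.List.mem_sorted]
    simp
  rw [List.singleton_append]
  congr 1
  exact PySem.List.sorted_eq_of_perm_of_pairwise_lt (PySem.Set.ofList L) (pvDedup none (PySem.List.sorted L (fun x => x) false)) (fun x => x) hperm hded.1

-- ===== VERDICT (by name: the statement is the Claim_ definition above) =====
theorem get_unique_genres_spec : Claim_equal_get_unique_genres := by
  intro dc _
  unfold Spec_get_unique_genres
  exact get_unique_genres_eq_alt dc
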